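-- pv_equiv track=rewrite | github.com/jiangxi1993/computationalThinking2019 | Mini_project/Q2/q2a.py | sv_iterative
-- ===== SOURCE A (Python) =====
-- import copy
--
-- def sv_iterative(m):
--   x_start=len(m)-1
--   y_start=len(m[0])-1
--   n=copy.deepcopy(m)
--   for j in range(y_start, -1, -1):
--     for i in range(x_start, -1, -1):
--       if  i==x_start and j==y_start:
--         n[i][j]=m[i][j]
--       elif i==x_start and j!=y_start:
--         n[i][j]=(n[i][j+1])+(m[i][j])
--       elif i!=x_start and j==y_start:
--         n[i][j]=(n[i+1][j])+(m[i][j])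
--       elif i!=x_start and j!=y_start:
--         n[i][j]=n[i][j+1]+n[i+1][j]+m[i][j]
--
--   return n[0][0]
-- ===== SOURCE B (Python) =====
-- import math
--
-- def sv_iterative(m):
--     cols = len(m[0])
--     total = 0
--     for i, row in enumerate(m):
--         for j in range(cols):
--             total += row[j] * math.comb(i + j, i)
--     return total
-- ===== Notes on version B (the rewrite author's own statement) =====
-- stated objective: simpler
-- what changed: Replaces the backwards grid-filling DP (deepcopy plus a mutated table) with a single closed-form accumulation total += m[i][j] * comb(i+j, i), the lattice-path count to each cell.
import Mathlib
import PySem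

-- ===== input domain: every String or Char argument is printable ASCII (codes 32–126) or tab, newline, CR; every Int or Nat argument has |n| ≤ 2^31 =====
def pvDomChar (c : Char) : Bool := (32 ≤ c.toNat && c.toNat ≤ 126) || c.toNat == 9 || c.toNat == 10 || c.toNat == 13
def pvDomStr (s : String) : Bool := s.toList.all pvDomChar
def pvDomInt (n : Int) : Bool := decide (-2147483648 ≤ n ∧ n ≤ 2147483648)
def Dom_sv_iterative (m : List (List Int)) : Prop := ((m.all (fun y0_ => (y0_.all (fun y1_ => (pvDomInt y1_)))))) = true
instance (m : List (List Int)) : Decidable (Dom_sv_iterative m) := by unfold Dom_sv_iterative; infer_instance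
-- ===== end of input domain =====

-- B replaces the backwards grid-filling DP of A with the closed-form sum
-- Σ m[i][j] * C(i+j, i) (lattice-path weight of each cell): simpler, no table, no deepcopy.

-- ===== PORT A =====
-- n[i][j] read (indices are nonnegative and in range on Pre_; default totalizes only)
def pvGet2 (n : List (List Int)) (i j : Int) : Int :=
  PySem.List.pyGetD (PySem.List.pyGetD n i []) j 0

-- n[i][j] = v (in range on Pre_)
def pvSet2 (n : List (List Int)) (i j : Int) (v : Int) : List (List Int) :=
  PySem.List.pySetD n i (PySem.List.pySetD (PySem.List.pyGetD n i []) j v)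

-- literal transliteration of A: deepcopy n := m, two descending loops, four branches
def sv_iterative (m : List (List Int)) : Int :=
  let xStart : Int := (m.length : Int) - 1
  let yStart : Int := ((m.headD []).length : Int) - 1
  let n : List (List Int) :=
    (PySem.List.pyRange yStart (-1) (-1)).foldl (fun n j =>
      (PySem.List.pyRange xStart (-1) (-1)).foldl (fun n i =>
        pvSet2 n i j
          (if i = xStart ∧ j = yStart then pvGet2 m i j
           else if i = xStart ∧ j ≠ yStart then pvGet2 n i (j+1) + pvGet2 m i j
           else if i ≠ xStart ∧ j = yStart then pvGet2 n (i+1) j + pvGet2 m i j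
           else pvGet2 n i (j+1) + pvGet2 n (i+1) j + pvGet2 m i j)) n) m
  pvGet2 n 0 0

-- ===== PORT B =====
-- literal transliteration of Source B: total += row[j] * comb(i+j, i) over enumerate(m) × range(cols)
def sv_iterative_alt (m : List (List Int)) : Int :=
  let cols : Int := ((m.headD []).length : Int)
  (PySem.List.enumerate m 0).foldl (fun total p =>
    (PySem.List.pyRange 0 cols 1).foldl (fun total j =>
      total + PySem.List.pyGetD p.2 j 0 * (Nat.choose ((p.1 + j).toNat) p.1.toNat : Int)) total) 0

-- ===== PRECONDITION & SPEC =====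
-- Pre_ excludes exactly the inputs where A raises IndexError: the empty grid, a grid whose
-- first row is empty (n[0][0] fails), and grids with a row shorter than the first row
-- (the assignment n[i][j] = ... fails there).
def Pre_sv_iterative (m : List (List Int)) : Prop :=
  m ≠ [] ∧ (m.headD []) ≠ [] ∧ ∀ r ∈ m, (m.headD []).length ≤ r.length
instance (m : List (List Int)) : Decidable (Pre_sv_iterative m) := by
  unfold Pre_sv_iterative; infer_instance

def pvWitness_sv_iterative : List (List Int) := [[1, 2], [3, 4]]

def Spec_sv_iterative (m : List (List Int)) (out : Int) : Prop := out = sv_iterative_alt m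
instance (m : List (List Int)) (out : Int) : Decidable (Spec_sv_iterative m out) := by
  unfold Spec_sv_iterative; infer_instance

-- ===== CLAIM (what is proved, stated in full; the proofs are below) =====
def Claim_equal_sv_iterative : Prop :=
  ∀ (m : List (List Int)), Dom_sv_iterative m → Pre_sv_iterative m →
    Spec_sv_iterative m (sv_iterative m)

-- ===== LEMMAS AND PROOFS =====

-- m[i][j], totalized with 0 (Nat indices)
def pvCell (m : List (List Int)) (i j : Nat) : Int := (m.getD i []).getD j 0

-- weighted suffix-rectangle sum: the value A's DP stores at (i, j)
def pvG (m : List (List Int)) (c : Nat) (i j : Nat) : Int :=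
  ∑ p ∈ Finset.range (m.length - i), ∑ q ∈ Finset.range (c - j),
    pvCell m (i + p) (j + q) * (Nat.choose (p + q) p : Int)

lemma pvG_row_out (m : List (List Int)) (c : Nat) (i j : Nat) (h : m.length ≤ i) :
    pvG m c i j = 0 := by simp [pvG, Nat.sub_eq_zero_of_le h]

lemma pvG_col_out (m : List (List Int)) (c : Nat) (i j : Nat) (h : c ≤ j) :
    pvG m c i j = 0 := by simp [pvG, Nat.sub_eq_zero_of_le h]

lemma pvCell_row_out (m : List (List Int)) (i j : Nat) (h : m.length ≤ i) :
    pvCell m i j = 0 := by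
  simp [pvCell, List.getD, List.getElem?_eq_none (by omega : m.length ≤ i)]

-- the DP recurrence, via Pascal's rule
set_option maxRecDepth 4096 in
lemma pvG_rec (m : List (List Int)) (c : Nat) (i j : Nat) (hj : j < c) :
    pvG m c i j = pvCell m i j + pvG m c i (j+1) + pvG m c (i+1) j := by
  by_cases hi : i < m.length
  case neg =>
    rw [pvG_row_out _ _ _ _ (by omega), pvG_row_out _ _ _ _ (by omega),
        pvG_row_out _ _ _ _ (by omega), pvCell_row_out _ _ _ (by omega)]
    ring
  obtain ⟨A, hA⟩ : ∃ A, m.length - i = A + 1 := ⟨m.length - i - 1, by omega⟩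
  obtain ⟨B, hB⟩ : ∃ B, c - j = B + 1 := ⟨c - j - 1, by omega⟩
  have hA' : m.length - (i+1) = A := by omega
  have hB' : c - (j+1) = B := by omega
  unfold pvG
  rw [hA, hB, hA', hB']
  rw [Finset.sum_range_succ']
  -- p = 0 column of the LHS
  have t0 : ∑ q ∈ Finset.range (B+1), pvCell m (i+0) (j+q) * (Nat.choose (0+q) 0 : Int)
      = pvCell m i j + ∑ q ∈ Finset.range B, pvCell m i (j+1+q) := by
    rw [Finset.sum_range_succ']
    simp only [Nat.zero_add, Nat.choose_zero_right, Nat.cast_one, mul_one, Nat.add_zero]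
    rw [Finset.sum_congr rfl (fun q _ => by rw [show j+(q+1) = j+1+q from by omega] :
      ∀ q ∈ Finset.range B, pvCell m i (j+(q+1)) = pvCell m i (j+1+q))]
    ring
  rw [t0]
  -- Pascal split of each p+1 row of the LHS
  have tmain : ∀ p ∈ Finset.range A,
      (∑ q ∈ Finset.range (B+1), pvCell m (i+(p+1)) (j+q) * (Nat.choose ((p+1)+q) (p+1) : Int))
      = (∑ q ∈ Finset.range (B+1), pvCell m (i+1+p) (j+q) * (Nat.choose (p+q) p : Int))
        + ∑ q ∈ Finset.range B, pvCell m (i+1+p) (j+1+q) * (Nat.choose (p+1+q) (p+1) : Int) := by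
    intro p _
    have step1 : ∀ q ∈ Finset.range (B+1),
        pvCell m (i+(p+1)) (j+q) * (Nat.choose ((p+1)+q) (p+1) : Int)
        = pvCell m (i+1+p) (j+q) * (Nat.choose (p+q) p : Int)
          + pvCell m (i+1+p) (j+q) * (Nat.choose (p+q) (p+1) : Int) := by
      intro q _
      rw [show i+(p+1) = i+1+p from by omega, show (p+1)+q = (p+q)+1 from by omega,
          Nat.choose_succ_succ]
      push_cast; ring
    rw [Finset.sum_congr rfl step1, Finset.sum_add_distrib]
    congr 1
    rw [Finset.sum_range_succ']
    have last0 : pvCell m (i+1+p) (j+0) * (Nat.choose (p+0) (p+1) : Int) = 0 := by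
      rw [Nat.add_zero, Nat.choose_succ_self]; simp
    rw [last0, add_zero]
    exact Finset.sum_congr rfl (fun q _ => by
      rw [show j+(q+1) = j+1+q from by omega, show p+(q+1) = p+1+q from by omega])
  rw [Finset.sum_congr rfl tmain, Finset.sum_add_distrib]
  -- split the p-range of pvG i (j+1) on the RHS
  rw [Finset.sum_range_succ' (fun p => ∑ q ∈ Finset.range B,
        pvCell m (i+p) ((j+1)+q) * (Nat.choose (p+q) p : Int)) A]
  have r0 : ∑ q ∈ Finset.range B, pvCell m (i+0) ((j+1)+q) * (Nat.choose (0+q) 0 : Int)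
      = ∑ q ∈ Finset.range B, pvCell m i (j+1+q) := by
    exact Finset.sum_congr rfl (fun q _ => by
      rw [show i+0 = i from rfl, Nat.zero_add, Nat.choose_zero_right]; simp)
  rw [r0]
  have rmain : ∀ p ∈ Finset.range A,
      (∑ q ∈ Finset.range B, pvCell m (i+(p+1)) ((j+1)+q) * (Nat.choose ((p+1)+q) (p+1) : Int))
      = ∑ q ∈ Finset.range B, pvCell m (i+1+p) (j+1+q) * (Nat.choose (p+1+q) (p+1) : Int) := by
    intro p _
    exact Finset.sum_congr rfl (fun q _ => by rw [show i+(p+1) = i+1+p from by omega])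
  rw [Finset.sum_congr rfl rmain]
  ring

-- ---------- A-side machinery ----------

-- the loop body of A's inner loop, as a named function (definitionally the port's lambda)
def pvBody (m : List (List Int)) (j : Int) (n : List (List Int)) (i : Int) : List (List Int) :=
  pvSet2 n i j
    (if i = (m.length : Int) - 1 ∧ j = ((m.headD []).length : Int) - 1 then pvGet2 m i j
     else if i = (m.length : Int) - 1 ∧ j ≠ ((m.headD []).length : Int) - 1 then
       pvGet2 n i (j+1) + pvGet2 m i j
     else if i ≠ (m.length : Int) - 1 ∧ j = ((m.headD []).length : Int) - 1 then
       pvGet2 n (i+1) j + pvGet2 m i j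
     else pvGet2 n i (j+1) + pvGet2 n (i+1) j + pvGet2 m i j)

lemma sv_iterative_def (m : List (List Int)) :
    sv_iterative m =
      pvGet2 ((PySem.List.pyRange (((m.headD []).length : Int) - 1) (-1) (-1)).foldl
        (fun n j => (PySem.List.pyRange ((m.length : Int) - 1) (-1) (-1)).foldl
          (pvBody m j) n) m) 0 0 := rfl

lemma pvGet2_natCast (n : List (List Int)) (i j : Nat) :
    pvGet2 n (i : Int) (j : Int) = pvCell n i j := by
  simp [pvGet2, pvCell, PySem.List.pyGetD_natCast]

lemma pvSet2_natCast (n : List (List Int)) (i j : Nat) (v : Int) :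
    pvSet2 n (i : Int) (j : Int) v = n.set i ((n.getD i []).set j v) := by
  simp [pvSet2, PySem.List.pySetD_natCast, PySem.List.pyGetD_natCast]

-- shape of the working table is that of m
def pvShape (m n : List (List Int)) : Prop :=
  n.length = m.length ∧ ∀ i : Nat, (n.getD i []).length = (m.getD i []).length

lemma pvShape_set (m n : List (List Int)) (i j : Nat) (v : Int)
    (h : pvShape m n) : pvShape m (n.set i ((n.getD i []).set j v)) := by
  obtain ⟨h1, h2⟩ := h
  refine ⟨by simp [h1], fun i' => ?_⟩
  by_cases hii : i' = i
  · subst hii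
    by_cases hlt : i' < n.length
    · rw [List.getD, List.getElem?_set_self (by omega), Option.getD_some, List.length_set]
      exact h2 i'
    · rw [List.set_eq_of_length_le (by omega)]
      exact h2 i'
  · rw [List.getD, List.getElem?_set_ne (by omega)]
    exact h2 i'

lemma pvCell_set_same (n : List (List Int)) (i j : Nat) (v : Int)
    (hi : i < n.length) (hj : j < (n.getD i []).length) :
    pvCell (n.set i ((n.getD i []).set j v)) i j = v := by
  unfold pvCell
  rw [show (n.set i ((n.getD i []).set j v)).getD i [] = (n.getD i []).set j v from by
        simp [List.getD, List.getElem?_set_self hi]]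
  simp [List.getD, List.getElem?_set_self (show j < (n[i]?.getD []).length from hj)]

lemma pvCell_set_other (n : List (List Int)) (i j i' j' : Nat) (v : Int)
    (h : i' ≠ i ∨ j' ≠ j) :
    pvCell (n.set i ((n.getD i []).set j v)) i' j' = pvCell n i' j' := by
  unfold pvCell
  by_cases hii : i' = i
  · subst hii
    have hjj : j' ≠ j := by tauto
    by_cases hlt : i' < n.length
    · rw [show (n.set i' ((n.getD i' []).set j v)).getD i' [] = (n.getD i' []).set j v from by
            simp [List.getD, List.getElem?_set_self hlt]]
      simp [List.getD, List.getElem?_set_ne (by omega : j ≠ j')]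
    · rw [List.set_eq_of_length_le (by omega)]
  · rw [show (n.set i ((n.getD i []).set j v)).getD i' [] = n.getD i' [] from by
        simp [List.getD, List.getElem?_set_ne (by omega : i ≠ i')]]

lemma pvCell_big_row (m n : List (List Int)) (i j : Nat) (hs : pvShape m n)
    (h : m.length ≤ i) : pvCell n i j = 0 := by
  apply pvCell_row_out
  rw [hs.1]; omega

-- invariant while the inner loop works down column j: rows ≥ i0 of column j are done,
-- all columns > j are done
def pvInvI (m : List (List Int)) (c : Nat) (j : Nat) (n : List (List Int)) (i0 : Nat) : Prop :=
  pvShape m n ∧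
  (∀ i : Nat, i0 ≤ i → pvCell n i j = pvG m c i j) ∧
  (∀ i jj : Nat, jj < c → j + 1 ≤ jj → pvCell n i jj = pvG m c i jj)

-- invariant between outer iterations: all columns ≥ j0 are done
def pvInv (m : List (List Int)) (c : Nat) (n : List (List Int)) (j0 : Nat) : Prop :=
  pvShape m n ∧ ∀ i jj : Nat, jj < c → j0 ≤ jj → pvCell n i jj = pvG m c i jj

lemma pvBody_step (m : List (List Int)) (n : List (List Int)) (j i0 : Nat)
    (hpre : Pre_sv_iterative m) (hj : j < (m.headD []).length) (hi0 : i0 < m.length)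
    (hinv : pvInvI m (m.headD []).length j n (i0+1)) :
    pvInvI m (m.headD []).length j (pvBody m (j : Int) n (i0 : Int)) i0 := by
  obtain ⟨hm, hhd, hrows⟩ := hpre
  obtain ⟨hs, hcol, hrest⟩ := hinv
  set c := (m.headD []).length with hc
  set R := m.length with hR
  have hR1 : 1 ≤ R := by
    cases m with
    | nil => exact absurd rfl hm
    | cons a l => simp [hR]
  have hc1 : 1 ≤ c := by
    show 1 ≤ (m.headD []).length
    cases h : m.headD [] with
    | nil => exact absurd h hhd
    | cons a l => simp
  -- the branch value equals pvG m c i0 j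
  have hv : (if (i0 : Int) = (R : Int) - 1 ∧ (j : Int) = (c : Int) - 1 then
        pvGet2 m (i0 : Int) (j : Int)
      else if (i0 : Int) = (R : Int) - 1 ∧ (j : Int) ≠ (c : Int) - 1 then
        pvGet2 n (i0 : Int) ((j : Int)+1) + pvGet2 m (i0 : Int) (j : Int)
      else if (i0 : Int) ≠ (R : Int) - 1 ∧ (j : Int) = (c : Int) - 1 then
        pvGet2 n ((i0 : Int)+1) (j : Int) + pvGet2 m (i0 : Int) (j : Int)
      else pvGet2 n (i0 : Int) ((j : Int)+1) + pvGet2 n ((i0 : Int)+1) (j : Int) +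
        pvGet2 m (i0 : Int) (j : Int)) = pvG m c i0 j := by
    have gm : pvGet2 m (i0 : Int) (j : Int) = pvCell m i0 j := pvGet2_natCast m i0 j
    have gright : pvGet2 n (i0 : Int) ((j : Int)+1) = pvCell n i0 (j+1) := by
      rw [show ((j : Int)+1) = ((j+1 : Nat) : Int) from by push_cast; ring]
      exact pvGet2_natCast n i0 (j+1)
    have gdown : pvGet2 n ((i0 : Int)+1) (j : Int) = pvCell n (i0+1) j := by
      rw [show ((i0 : Int)+1) = ((i0+1 : Nat) : Int) from by push_cast; ring]
      exact pvGet2_natCast n (i0+1) j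
    rw [pvG_rec m c i0 j hj]
    by_cases hiR : i0 = R - 1 <;> by_cases hjc : j = c - 1
    · rw [if_pos ⟨by omega, by omega⟩, gm,
          pvG_col_out m c i0 (j+1) (by omega), pvG_row_out m c (i0+1) j (by omega)]
      ring
    · rw [if_neg (by omega), if_pos ⟨by omega, by omega⟩, gright, gm,
          hrest i0 (j+1) (by omega) (by omega), pvG_row_out m c (i0+1) j (by omega)]
      ring
    · rw [if_neg (by omega), if_neg (by omega), if_pos ⟨by omega, by omega⟩, gdown, gm,
          hcol (i0+1) (by omega), pvG_col_out m c i0 (j+1) (by omega)]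
      ring
    · rw [if_neg (by omega), if_neg (by omega), if_neg (by omega), gright, gdown, gm,
          hrest i0 (j+1) (by omega) (by omega), hcol (i0+1) (by omega)]
      ring
  unfold pvBody
  rw [hv, pvSet2_natCast]
  have hjrow : j < (n.getD i0 []).length := by
    have e1 : (n.getD i0 []).length = (m.getD i0 []).length := hs.2 i0
    have e2 : m.getD i0 [] ∈ m := by
      rw [List.getD_eq_getElem m [] (by omega)]
      exact List.getElem_mem _
    have e3 := hrows _ e2
    omega
  refine ⟨pvShape_set m n i0 j _ hs, ?_, ?_⟩
  · intro i hi
    by_cases hii : i = i0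
    · subst hii
      rw [pvCell_set_same n i j _ (by rw [hs.1]; omega) hjrow]
    · rw [pvCell_set_other n i0 j i j _ (Or.inl (by omega))]
      exact hcol i (by omega)
  · intro i jj h1 h2
    rw [pvCell_set_other n i0 j i jj _ (Or.inr (by omega))]
    exact hrest i jj h1 h2

-- run the inner loop from row t-1 down to 0
lemma pvInner_fold (m : List (List Int)) (j : Nat) (hpre : Pre_sv_iterative m)
    (hj : j < (m.headD []).length) :
    ∀ (t : Nat) (n : List (List Int)), t ≤ m.length →
      pvInvI m (m.headD []).length j n t →
      pvInvI m (m.headD []).length j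
        ((PySem.List.pyRange ((t : Int) - 1) (-1) (-1)).foldl (pvBody m (j : Int)) n) 0 := by
  intro t
  induction t with
  | zero =>
    intro n _ hinv
    rw [show ((0 : Nat) : Int) - 1 = -1 from by norm_num,
        PySem.List.pyRange_neg_one_eq_nil (show (-1:Int) ≤ -1 by norm_num)]
    exact hinv
  | succ k ih =>
    intro n hk hinv
    rw [show ((k+1 : Nat) : Int) - 1 = (k : Int) from by push_cast; ring,
        PySem.List.pyRange_neg_one_cons (by omega : (-1 : Int) < (k : Int)), List.foldl_cons]
    have hstep := pvBody_step m n j k hpre hj (by omega) hinv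
    rw [show (k : Int) - 1 = ((k : Nat) : Int) - 1 from rfl]
    exact ih (pvBody m (j : Int) n (k : Int)) (by omega) hstep

-- run the outer loop from column t-1 down to 0
lemma pvOuter_fold (m : List (List Int)) (hpre : Pre_sv_iterative m) :
    ∀ (t : Nat) (n : List (List Int)), t ≤ (m.headD []).length →
      pvInv m (m.headD []).length n t →
      pvInv m (m.headD []).length
        ((PySem.List.pyRange ((t : Int) - 1) (-1) (-1)).foldl
          (fun n j => (PySem.List.pyRange ((m.length : Int) - 1) (-1) (-1)).foldl
            (pvBody m j) n) n) 0 := by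
  intro t
  induction t with
  | zero =>
    intro n _ hinv
    rw [show ((0 : Nat) : Int) - 1 = -1 from by norm_num,
        PySem.List.pyRange_neg_one_eq_nil (show (-1:Int) ≤ -1 by norm_num)]
    exact hinv
  | succ k ih =>
    intro n hk hinv
    rw [show ((k+1 : Nat) : Int) - 1 = (k : Int) from by push_cast; ring,
        PySem.List.pyRange_neg_one_cons (by omega : (-1 : Int) < (k : Int)), List.foldl_cons]
    obtain ⟨hs, hdone⟩ := hinv
    have hstart : pvInvI m (m.headD []).length k n m.length := by
      refine ⟨hs, ?_, ?_⟩
      · intro i hi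
        rw [pvCell_big_row m n i k hs (by omega), pvG_row_out m _ i k (by omega)]
      · intro i jj h1 h2
        exact hdone i jj h1 (by omega)
    have hinner := pvInner_fold m k hpre (by omega) m.length n le_rfl hstart
    rw [show ((m.length : Int) - 1) = ((m.length : Nat) : Int) - 1 from rfl] at hinner ⊢
    obtain ⟨hs', hcol', hrest'⟩ := hinner
    apply ih
    · omega
    · refine ⟨hs', ?_⟩
      intro i jj h1 h2
      by_cases hjj : jj = k
      · subst hjj; exact hcol' i (by omega)
      · exact hrest' i jj h1 (by omega)

lemma sv_iterative_eq_g (m : List (List Int)) (h : Pre_sv_iterative m) :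
    sv_iterative m = pvG m (m.headD []).length 0 0 := by
  have hc1 : 1 ≤ (m.headD []).length := by
    cases hh : m.headD [] with
    | nil => exact absurd hh h.2.1
    | cons a l => simp
  rw [sv_iterative_def]
  have hstart : pvInv m (m.headD []).length m (m.headD []).length :=
    ⟨⟨rfl, fun _ => rfl⟩, fun i jj h1 h2 => by omega⟩
  have hfin := pvOuter_fold m h (m.headD []).length m le_rfl hstart
  rw [show (((m.headD []).length : Int) - 1) = (((m.headD []).length : Nat) : Int) - 1 from rfl]
  rw [show ((0 : Int)) = ((0 : Nat) : Int) from rfl]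
  rw [pvGet2_natCast]
  exact hfin.2 0 0 (by omega) (by omega)

-- ---------- B-side ----------

lemma pvAlt_inner (row : List Int) (c : Nat) (i : Int) (t : Int) :
    (PySem.List.pyRange 0 (c : Int) 1).foldl
      (fun t j => t + PySem.List.pyGetD row j 0 * (Nat.choose ((i+j).toNat) i.toNat : Int)) t
    = t + ∑ q ∈ Finset.range c, row.getD q 0 * (Nat.choose ((i+q).toNat) i.toNat : Int) := by
  rw [PySem.List.pyRange_zero_nat, List.foldl_map, PySem.List.foldl_add]
  simp; rfl

lemma pvAlt_outer (c : Nat) : ∀ (rows : List (List Int)) (s : Nat) (t : Int),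
    (PySem.List.enumerate rows (s : Int)).foldl (fun total p =>
      (PySem.List.pyRange 0 (c : Int) 1).foldl (fun total j =>
        total + PySem.List.pyGetD p.2 j 0 * (Nat.choose ((p.1 + j).toNat) p.1.toNat : Int)) total) t
    = t + ∑ pq ∈ Finset.range rows.length, ∑ q ∈ Finset.range c,
        (rows.getD pq []).getD q 0 * (Nat.choose (s + pq + q) (s + pq) : Int) := by
  intro rows
  induction rows with
  | nil => intro s t; simp [PySem.List.enumerate]
  | cons r rows ih =>
    intro s t
    rw [PySem.List.enumerate_cons, List.foldl_cons]
    have h1 : ((s : Int) + 1) = ((s+1 : Nat) : Int) := by push_cast; ring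
    rw [h1, ih (s+1), pvAlt_inner]
    rw [List.length_cons, Finset.sum_range_succ']
    have h2 : ∀ q : Nat, (((s : Int) + (q : Int)).toNat) = s + q := by intro q; omega
    have h3 : ((s : Int)).toNat = s := by omega
    simp only [h2, h3, List.getD_cons_zero, List.getD_cons_succ]
    have h5 : ∀ pq : Nat, s + 1 + pq = s + (pq + 1) := by omega
    simp only [h5]
    simp only [Nat.add_zero]
    ring

lemma sv_iterative_alt_eq_g (m : List (List Int)) :
    sv_iterative_alt m = pvG m (m.headD []).length 0 0 := by
  have e : sv_iterative_alt m =
      (PySem.List.enumerate m (((0:Nat) : Int))).foldl (fun total p =>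
        (PySem.List.pyRange 0 ((((m.headD []).length : Nat)) : Int) 1).foldl (fun total j =>
          total + PySem.List.pyGetD p.2 j 0 *
            (Nat.choose ((p.1 + j).toNat) p.1.toNat : Int)) total) 0 := rfl
  rw [e, pvAlt_outer]
  unfold pvG pvCell
  simp

-- ===== VERDICT (by name: the statement is the Claim_ definition above) =====
theorem sv_iterative_spec : Claim_equal_sv_iterative := by
  intro m _ hpre
  unfold Spec_sv_iterative
  rw [sv_iterative_eq_g m hpre, sv_iterative_alt_eq_g m]
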